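-- pv_equiv track=rewrite | github.com/TorbS00/EBA3400 | 2023/TripPlanner.py | find_nearest_stops
-- ===== SOURCE A (Python) =====
-- import math
--
-- bus_stop_dictionary = {
--     1: [2, 1],
--     2: [6, 1],
--     3: [5, 3],
--     4: [3, 4],
--     5: [3, 6],
--     6: [5, 7],
--     7: [7, 6]
-- }
--
-- def find_euclidean_distance(loc1, loc2):
--     x1 = loc1[0]
--     y1 = loc1[1]
--     x2 = loc2[0]
--     y2 = loc2[1]
--
--     return math.sqrt(((x2 - x1)**2) + ((y2 - y1)**2))
--
-- def euclidean_distances_to_dictionary(input_loc):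
--     distances = {}
--     for key in bus_stop_dictionary:
--         stop_loc = bus_stop_dictionary[key]
--         distance = find_euclidean_distance(input_loc, stop_loc)
--         distances[key] = distance
--     return distances
--
-- def find_nearest_stops(input_loc):
--     distances = euclidean_distances_to_dictionary(input_loc)
--     stops = []
--     counter = min(distances.values())
--
--     for distance_key in distances:
--         distance = distances[distance_key]
--         if distance <= counter:
--             stops.append(distance_key)
--     return stops
-- ===== SOURCE B (Python) =====
-- bus_stop_dictionary = {
--     1: [2, 1],
--     2: [6, 1],
--     3: [5, 3],
--     4: [3, 4],
--     5: [3, 6],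
--     6: [5, 7],
--     7: [7, 6]
-- }
--
--
-- def find_nearest_stops(input_loc):
--     # Single pass with a running best exact squared distance (no sqrt, no
--     # intermediate distances dict, no separate min() + re-scan passes).
--     x, y = input_loc[0], input_loc[1]
--     best = None
--     stops = []
--     for key, (sx, sy) in bus_stop_dictionary.items():
--         d = (sx - x) ** 2 + (sy - y) ** 2
--         if best is None or d < best:
--             best = d
--             stops = [key]
--         elif d == best:
--             stops.append(key)
--     return stops
-- ===== Notes on version B (the rewrite author's own statement) =====
-- stated objective: alternative
-- what changed: B replaces A's three passes (build a distances dict with float sqrt, take min() of its values, re-scan to collect winners) by a single fused pass that maintains a running best exact integer squared distance and resets/appends a winners list.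
-- outside the precondition, e.g. on find_nearest_stops([671088665, -134217728]): A returns [2, 7], B returns [7]; on find_nearest_stops([5]): A raises IndexError, B raises IndexError
import Mathlib
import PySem

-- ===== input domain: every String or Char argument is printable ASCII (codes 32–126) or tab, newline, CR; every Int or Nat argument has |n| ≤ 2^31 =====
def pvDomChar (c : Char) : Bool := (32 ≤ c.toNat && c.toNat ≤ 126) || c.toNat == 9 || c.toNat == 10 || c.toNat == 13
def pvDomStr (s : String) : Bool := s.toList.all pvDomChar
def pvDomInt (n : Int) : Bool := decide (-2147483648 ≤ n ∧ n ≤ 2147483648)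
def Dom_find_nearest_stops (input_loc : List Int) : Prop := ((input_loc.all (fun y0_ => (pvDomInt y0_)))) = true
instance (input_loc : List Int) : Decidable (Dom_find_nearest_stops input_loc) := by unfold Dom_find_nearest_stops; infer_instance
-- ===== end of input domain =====

-- B fuses A's three passes (distances dict, min(), re-scan) into ONE pass keeping a running best
-- squared distance and a winners list (objective: alternative decomposition; no speed claim).
-- Distances are compared as EXACT INTEGER SQUARES in both ports, an exact stand-in for Python's
-- math.sqrt comparisons on the Pre_ domain (|coordinates| ≤ 2^24): there every squared distance is
-- an integer below 2^50, exactly representable as a double, and correctly-rounded sqrt is strictly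
-- monotone and injective on those integers, so equality/min of the sqrt floats coincides with
-- equality/min of the integer squares.

-- ===== PORT A =====
-- the module constant bus_stop_dictionary (distinct keys, insertion order)
def busStops : List (Int × Int × Int) :=
  [(1, 2, 1), (2, 6, 1), (3, 5, 3), (4, 3, 4), (5, 3, 6), (6, 5, 7), (7, 7, 6)]

def find_nearest_stops (input_loc : List Int) : List Int :=
  match input_loc with
  | x :: y :: _ =>
      -- euclidean_distances_to_dictionary: loop over the dict building distances[key]
      -- (keys are distinct, so the dict is the association list built by appending);
      -- find_euclidean_distance ported as the exact integer square (see header comment)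
      let distances : List (Int × Int) :=
        busStops.foldl (fun d s => d ++ [(s.1, (s.2.1 - x) ^ 2 + (s.2.2 - y) ^ 2)]) []
      -- counter = min(distances.values())  (distances is never empty, so getD is never used)
      let counter : Int := (PySem.List.min? (distances.map Prod.snd) (fun v => v)).getD 0
      -- the collecting loop: append every key whose distance is ≤ counter
      distances.foldl (fun st p => if p.2 ≤ counter then st ++ [p.1] else st) []
  | _ => []  -- input_loc[0] / input_loc[1] raises IndexError: outside Pre_

-- ===== PORT B =====
-- B's own copy of the module constant bus_stop_dictionary
def busStopsAlt : List (Int × Int × Int) :=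
  [(1, 2, 1), (2, 6, 1), (3, 5, 3), (4, 3, 4), (5, 3, 6), (6, 5, 7), (7, 7, 6)]

def find_nearest_stops_alt (input_loc : List Int) : List Int :=
  match input_loc with
  | [] => []  -- input_loc[0] raises IndexError: outside Pre_
  | [_] => []  -- input_loc[1] raises IndexError: outside Pre_
  | x :: y :: _ =>
      -- single pass: running best squared distance + winners list (reset on <, append on =)
      (busStopsAlt.foldl
        (fun acc s =>
          let d := (s.2.1 - x) ^ 2 + (s.2.2 - y) ^ 2
          match acc.1 with
          | none => (some d, [s.1])
          | some b =>
              if d < b then (some d, [s.1])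
              else if d = b then (acc.1, acc.2 ++ [s.1])
              else acc)
        ((none : Option Int), ([] : List Int))).2

-- ===== PRECONDITION & SPEC =====
-- Pre_ excludes (a) lists with fewer than two coordinates, where A raises IndexError, and
-- (b) coordinates beyond 2^24 in magnitude, where A's float sqrt can merge distinct squared
-- distances so its tie set is an accident of double rounding (B uses exact integers there);
-- inside Pre_ the integer-square ports are exact for both Pythons.
def Pre_find_nearest_stops (input_loc : List Int) : Prop :=
  2 ≤ input_loc.length ∧ ∀ v ∈ input_loc.take 2, v.natAbs ≤ 16777216
instance (input_loc : List Int) : Decidable (Pre_find_nearest_stops input_loc) := by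
  unfold Pre_find_nearest_stops; infer_instance
def pvWitness_find_nearest_stops : List Int := [2, 1]

def Spec_find_nearest_stops (input_loc : List Int) (out : List Int) : Prop := out = find_nearest_stops_alt input_loc
instance (input_loc : List Int) (out : List Int) : Decidable (Spec_find_nearest_stops input_loc out) := by unfold Spec_find_nearest_stops; infer_instance

-- ===== CLAIM (what is proved, stated in full; the proofs are below) =====
def Claim_equal_find_nearest_stops : Prop := ∀ (input_loc : List Int), Dom_find_nearest_stops input_loc → Pre_find_nearest_stops input_loc → Spec_find_nearest_stops input_loc (find_nearest_stops input_loc)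

-- ===== LEMMAS AND PROOFS =====

-- B's step on an already-computed (key, distance) pair
def pstep (acc : Option Int × List Int) (q : Int × Int) : Option Int × List Int :=
  match acc with
  | (none, _) => (some q.2, [q.1])
  | (some b, st) =>
      if q.2 < b then (some q.2, [q.1])
      else if q.2 = b then (some b, st ++ [q.1])
      else (some b, st)

lemma foldl_min_le_init (l : List Int) (b : Int) : l.foldl min b ≤ b := by
  induction l generalizing b with
  | nil => simp
  | cons h t ih => exact le_trans (ih _) (min_le_left _ _)

lemma foldl_min_le_mem (l : List Int) (b v : Int) (h : v ∈ l) : l.foldl min b ≤ v := by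
  induction l generalizing b with
  | nil => simp at h
  | cons a t ih =>
    rcases List.mem_cons.mp h with h' | h'
    · subst h'; exact le_trans (foldl_min_le_init t _) (min_le_right _ _)
    · exact ih _ h'

-- characterisation of B's running-min fold
lemma pstep_foldl_char (dl : List (Int × Int)) (b : Int) (acc : List Int) :
    dl.foldl pstep (some b, acc) =
      (some ((dl.map Prod.snd).foldl min b),
       (if (dl.map Prod.snd).foldl min b = b then acc else []) ++
         (dl.filter (fun q => q.2 = (dl.map Prod.snd).foldl min b)).map Prod.fst) := by
  induction dl generalizing b acc with
  | nil => simp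
  | cons q dl ih =>
    rcases lt_trichotomy q.2 b with hlt | heq | hgt
    · -- strict improvement: reset to [q.1]
      have hstep : pstep (some b, acc) q = (some q.2, [q.1]) := by
        simp only [pstep]; rw [if_pos hlt]
      rw [List.foldl_cons, hstep, ih,
        show ((q :: dl).map Prod.snd).foldl min b = (dl.map Prod.snd).foldl min q.2 by
          simp [min_eq_right hlt.le]]
      set m := (dl.map Prod.snd).foldl min q.2 with hm
      have hle : m ≤ q.2 := hm ▸ foldl_min_le_init _ _
      rcases eq_or_lt_of_le hle with hq | hq
      · rw [if_pos hq, if_neg (show ¬ m = b by omega)]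
        simp [← hq]
      · rw [if_neg (show ¬ m = q.2 by omega), if_neg (show ¬ m = b by omega)]
        simp [show ¬ q.2 = m by omega]
    · -- tie with the running best: append q.1
      subst heq
      have hstep : pstep (some q.2, acc) q = (some q.2, acc ++ [q.1]) := by
        simp [pstep]
      rw [List.foldl_cons, hstep, ih,
        show ((q :: dl).map Prod.snd).foldl min q.2 = (dl.map Prod.snd).foldl min q.2 by simp]
      set m := (dl.map Prod.snd).foldl min q.2 with hm
      have hle : m ≤ q.2 := hm ▸ foldl_min_le_init _ _
      rcases eq_or_lt_of_le hle with hq | hq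
      · rw [if_pos hq, if_pos hq]
        simp [← hq]
      · rw [if_neg (show ¬ m = q.2 by omega), if_neg (show ¬ m = q.2 by omega)]
        simp [show ¬ q.2 = m by omega]
    · -- worse: state unchanged
      have hstep : pstep (some b, acc) q = (some b, acc) := by
        simp only [pstep]; rw [if_neg (show ¬ q.2 < b by omega), if_neg (show ¬ q.2 = b by omega)]
      rw [List.foldl_cons, hstep, ih,
        show ((q :: dl).map Prod.snd).foldl min b = (dl.map Prod.snd).foldl min b by
          simp [min_eq_left hgt.le]]
      set m := (dl.map Prod.snd).foldl min b with hm
      have hle : m ≤ b := hm ▸ foldl_min_le_init _ _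
      simp [show ¬ q.2 = m by omega]

-- the two ports agree on every location of length ≥ 2
lemma ports_agree (x y : Int) (rest : List Int) :
    find_nearest_stops (x :: y :: rest) = find_nearest_stops_alt (x :: y :: rest) := by
  unfold find_nearest_stops find_nearest_stops_alt
  simp only
  set f : Int × Int × Int → Int × Int := fun s => (s.1, (s.2.1 - x) ^ 2 + (s.2.2 - y) ^ 2) with hf
  have hdist : busStops.foldl (fun d s => d ++ [(s.1, (s.2.1 - x) ^ 2 + (s.2.2 - y) ^ 2)]) [] =
      busStops.map f := by
    have := PySem.List.foldl_append_singleton_eq_map (l := busStops) (f := f)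
      (acc := ([] : List (Int × Int)))
    simpa [hf] using this
  have hB : busStopsAlt.foldl
      (fun (acc : Option Int × List Int) s =>
        let d := (s.2.1 - x) ^ 2 + (s.2.2 - y) ^ 2
        match acc.1 with
        | none => (some d, [s.1])
        | some b =>
            if d < b then (some d, [s.1])
            else if d = b then (acc.1, acc.2 ++ [s.1])
            else acc)
      ((none : Option Int), ([] : List Int)) = (busStops.map f).foldl pstep (none, []) := by
    rw [show busStopsAlt = busStops from rfl, List.foldl_map]
    congr 1
    funext acc s
    obtain ⟨ob, st⟩ := acc
    cases ob <;> rfl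
  rw [hdist, hB]
  obtain ⟨p, dl, hcons⟩ : ∃ p dl, busStops.map f = p :: dl := ⟨_, _, rfl⟩
  rw [hcons]
  have hmin : PySem.List.min? ((p :: dl).map Prod.snd) (fun v => v) =
      some ((dl.map Prod.snd).foldl min p.2) := by
    simp only [List.map_cons]
    exact PySem.List.min?_id_cons _ _
  rw [hmin]
  simp only [Option.getD_some, List.foldl_cons]
  have hfirst : pstep (none, []) p = (some p.2, [p.1]) := rfl
  rw [hfirst, pstep_foldl_char]
  set M := (dl.map Prod.snd).foldl min p.2 with hMdef
  have hMle : M ≤ p.2 := hMdef ▸ foldl_min_le_init _ _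
  have hMmem : ∀ q ∈ dl, M ≤ q.2 := fun q hq => by
    rw [hMdef]; exact foldl_min_le_mem _ _ _ (List.mem_map_of_mem hq)
  have key : List.foldl (fun st (q : Int × Int) => if q.2 ≤ M then st ++ [q.1] else st)
      (if p.2 ≤ M then [] ++ [p.1] else []) dl =
      (if p.2 ≤ M then [] ++ [p.1] else []) ++ (dl.filter (fun q => q.2 ≤ M)).map Prod.fst := by
    simpa using PySem.List.foldl_append_if (l := dl) (p := fun q : Int × Int => q.2 ≤ M)
      (f := Prod.fst) (acc := (if p.2 ≤ M then [] ++ [p.1] else []))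
  refine Eq.trans key ?_
  have hfilter : dl.filter (fun q => decide (q.2 ≤ M)) = dl.filter (fun q => decide (q.2 = M)) :=
    List.filter_congr (fun q hq => by have := hMmem q hq; simp; omega)
  by_cases hp : p.2 ≤ M
  · rw [if_pos hp, if_pos (show M = p.2 by omega)]
    simp [hfilter]
  · rw [if_neg hp, if_neg (show ¬ M = p.2 by omega)]
    simp [hfilter]

-- ===== VERDICT (by name: the statement is the Claim_ definition above) =====
theorem find_nearest_stops_spec : Claim_equal_find_nearest_stops := by
  intro input_loc _ hpre
  obtain ⟨hlen, _⟩ := hpre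
  match input_loc, hlen with
  | x :: y :: rest, _ => exact ports_agree x y rest
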